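-- pv_equiv track=rewrite | github.com/glassk/algorithm | Python/Programmars/Level_3/숫자 게임.py | solution
-- ===== SOURCE A (Python) =====
-- def solution(A, B):
--     answer = 0
--     A.sort()
--     B.sort()
--     if all(a < b for a, b in zip(A, B)):
--         return len(A)
--     for a in A:
--         for i in range(len(B)):
--             if B[i] > a:
--                 answer += 1
--                 B.pop(i)
--                 break
--         else:
--             B.pop(0)
--     return answer
-- ===== SOURCE B (Python) =====
-- def solution(A, B):
--     # Two-pointer greedy over the two sorted lists (does not mutate A or B).
--     sa = sorted(A)
--     sb = sorted(B)
--     i = j = cnt = 0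
--     while i < len(sa) and j < len(sb):
--         if sb[j] > sa[i]:
--             cnt += 1
--             i += 1
--         j += 1
--     return cnt
-- ===== Notes on version B (the rewrite author's own statement) =====
-- stated objective: faster
-- what changed: Replaces A's per-element linear scan of B with list.pop (O(n^2)) by a single two-pointer sweep over the two sorted lists (O(n log n) total, dominated by the sorts); B also does not mutate its arguments.
-- intended difference: When len(A) > len(B) and every element of sorted A is below its sorted-B zip partner, A's early 'all' check (zip silently truncates to len(B)) returns len(A) matches, which is impossible with only len(B) opponents; B returns the true match count (at most len(B)), the intended value. — e.g. on solution([1, 2], [5]): A returns 2, B returns 1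
import Mathlib
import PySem

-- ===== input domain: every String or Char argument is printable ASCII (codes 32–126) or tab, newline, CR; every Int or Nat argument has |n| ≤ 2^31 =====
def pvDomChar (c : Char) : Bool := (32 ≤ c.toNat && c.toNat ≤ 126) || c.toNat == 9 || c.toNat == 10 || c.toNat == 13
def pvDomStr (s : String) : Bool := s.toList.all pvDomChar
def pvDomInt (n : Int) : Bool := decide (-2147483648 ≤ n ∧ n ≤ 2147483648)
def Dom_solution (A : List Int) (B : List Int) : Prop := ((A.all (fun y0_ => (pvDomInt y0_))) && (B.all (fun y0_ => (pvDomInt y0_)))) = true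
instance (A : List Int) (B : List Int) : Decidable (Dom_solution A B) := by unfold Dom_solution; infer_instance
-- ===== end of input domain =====

-- B replaces A's quadratic scan-and-pop over B by a two-pointer sweep of the two sorted
-- lists (faster: O(n log n) vs O(n^2)); A sorts and pops its arguments in place while B
-- does not, so the equivalence proved here is about the RETURN value only.


-- ===== PORT A =====
-- A's outer 'for a in A' with the mutable list B and the int accumulator 'answer';
-- the inner 'for i in range(len(B)) … break / else' is the first index with B[i] > a
-- (List.findIdx?).  'B.pop(0)' on empty B raises IndexError in Python: that is the
-- 'none' result here, excluded by Pre_solution.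
def solLoopA : List Int → List Int → Int → Option Int
  | [], _, answer => some answer
  | a :: As, B, answer =>
    match B.findIdx? (fun b => decide (a < b)) with
    | some i => solLoopA As (B.eraseIdx i) (answer + 1)
    | none =>
      match PySem.List.pop? B 0 with          -- B.pop(0); none = IndexError
      | none => none
      | some (_, B') => solLoopA As B' answer

def solution (A : List Int) (B : List Int) : Int :=
  -- A.sort(); B.sort(); then the 'all(... zip ...)' early return, else the main loop
  if ((PySem.List.sorted A (fun x => x)).zip (PySem.List.sorted B (fun x => x))).all
      (fun p => decide (p.1 < p.2)) then
    ((PySem.List.sorted A (fun x => x)).length : Int)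
  else
    (solLoopA (PySem.List.sorted A (fun x => x)) (PySem.List.sorted B (fun x => x)) 0).getD 0
    -- getD is unreachable under Pre_solution

-- ===== PORT B =====
-- Source B's while-loop: advancing i is dropping the head of the A-suffix, advancing j is
-- dropping the head of the B-suffix; 'cnt' is the accumulator.
def altGo : List Int → List Int → Int → Int
  | _, [], cnt => cnt
  | A, b :: Bs, cnt =>
    match A with
    | [] => cnt
    | a :: As => if a < b then altGo As Bs (cnt + 1) else altGo (a :: As) Bs cnt

def solution_alt (A : List Int) (B : List Int) : Int :=
  altGo (PySem.List.sorted A (fun x => x)) (PySem.List.sorted B (fun x => x)) 0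

-- ===== PRECONDITION & SPEC =====
-- the property A's early 'all(a < b for a, b in zip(A, B))' test (after the sorts)
-- checks, stated as a closed-form condition on the input: position by position, the
-- i-th smallest element of A is below the i-th smallest element of B
def pvAllLtP (A : List Int) (B : List Int) : Prop :=
  ∀ i < min A.length B.length,
    (A.insertionSort (· ≤ ·)).getD i 0 < (B.insertionSort (· ≤ ·)).getD i 0

-- Pre_ excludes exactly the inputs where A raises: with len(A) > len(B) and the zip-all
-- test false, A eventually does B.pop(0) on the exhausted list B (IndexError).
def Pre_solution (A : List Int) (B : List Int) : Prop :=
  A.length ≤ B.length ∨ pvAllLtP A B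
instance (A : List Int) (B : List Int) : Decidable (Pre_solution A B) := by
  unfold Pre_solution pvAllLtP; infer_instance

def pvWitness_solution : List Int × List Int := ([2, 1], [1, 3])

-- When len(A) > len(B) and every sorted-A element is below its sorted-B zip partner
-- (zip truncates to len(B)), A returns len(A) matches — impossible with only len(B)
-- opponents; B returns the true match count (≤ len(B)), the intended value.
def D_solution (A : List Int) (B : List Int) : Prop :=
  B.length < A.length ∧ pvAllLtP A B
instance (A : List Int) (B : List Int) : Decidable (D_solution A B) := by
  unfold D_solution pvAllLtP; infer_instance

def Spec_solution (A : List Int) (B : List Int) (out : Int) : Prop :=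
  ¬ D_solution A B → out = solution_alt A B
instance (A : List Int) (B : List Int) (out : Int) : Decidable (Spec_solution A B out) := by
  unfold Spec_solution; infer_instance

def pvDiffWitness_solution : List Int × List Int := ([1, 2], [5])
def pvDiffWitnessOut_solution : Int × Int := (2, 1)

-- ===== CLAIM (what is proved, stated in full; the proofs are below) =====
def Claim_unchanged_solution : Prop := ∀ (A : List Int) (B : List Int),
  Dom_solution A B → Pre_solution A B → Spec_solution A B (solution A B)

def Claim_changed_solution : Prop :=
  Dom_solution (pvDiffWitness_solution.1) (pvDiffWitness_solution.2) ∧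
  Pre_solution (pvDiffWitness_solution.1) (pvDiffWitness_solution.2) ∧
  D_solution (pvDiffWitness_solution.1) (pvDiffWitness_solution.2) ∧
  solution (pvDiffWitness_solution.1) (pvDiffWitness_solution.2) = pvDiffWitnessOut_solution.1 ∧
  solution_alt (pvDiffWitness_solution.1) (pvDiffWitness_solution.2) = pvDiffWitnessOut_solution.2 ∧
  pvDiffWitnessOut_solution.1 ≠ pvDiffWitnessOut_solution.2

def Claim_exact_solution : Prop := ∀ (A : List Int) (B : List Int),
  Dom_solution A B → Pre_solution A B → D_solution A B → solution A B ≠ solution_alt A B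

-- ===== LEMMAS AND PROOFS =====

-- equation lemmas for altGo (its match compiles to these three cases)
lemma altGo_nil_right (A : List Int) (c : Int) : altGo A [] c = c := rfl

lemma altGo_nil_left (B : List Int) (c : Int) : altGo [] B c = c := by cases B <;> rfl

lemma altGo_cons (a : Int) (As : List Int) (b : Int) (Bs : List Int) (c : Int) :
    altGo (a :: As) (b :: Bs) c =
      if a < b then altGo As Bs (c + 1) else altGo (a :: As) Bs c := rfl

-- when no B element exceeds any A element, the two-pointer loop matches nothing
lemma altGo_eq_acc (A B : List Int) (c : Int) (h : ∀ a ∈ A, ∀ b ∈ B, ¬ a < b) :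
    altGo A B c = c := by
  induction B with
  | nil => exact altGo_nil_right A c
  | cons b Bs ih =>
    cases A with
    | nil => exact altGo_nil_left _ c
    | cons a As =>
      have hab : ¬ a < b := h a (by simp) b (by simp)
      rw [altGo_cons, if_neg hab]
      exact ih (fun x hx y hy => h x hx y (by simp [hy]))

-- a prefix of B below every element of A is skipped by the two-pointer loop
lemma altGo_skip (A C B : List Int) (c : Int) (h : ∀ a ∈ A, ∀ x ∈ C, ¬ a < x) :
    altGo A (C ++ B) c = altGo A B c := by
  induction C with
  | nil => rfl
  | cons x Cs ih =>
    cases A with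
    | nil => rw [altGo_nil_left, altGo_nil_left]
    | cons a As =>
      have hax : ¬ a < x := h a (by simp) x (by simp)
      rw [List.cons_append, altGo_cons, if_neg hax]
      exact ih (fun y hy z hz => h y hy z (by simp [hz]))

lemma altGo_le (A B : List Int) (c : Int) : altGo A B c ≤ c + B.length := by
  induction B generalizing A c with
  | nil => rw [altGo_nil_right]; simp
  | cons b Bs ih =>
    cases A with
    | nil => rw [altGo_nil_left]; simp; omega
    | cons a As =>
      rw [altGo_cons]
      split
      · have := ih As (c + 1); simp at this ⊢; omega
      · have := ih (a :: As) c; simp at this ⊢; omega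

-- A's loop, on sorted lists with enough opponents, computes exactly B's two-pointer count
lemma loopA_eq (A : List Int) : ∀ (B : List Int) (c : Int),
    A.Pairwise (· ≤ ·) → B.Pairwise (· ≤ ·) → A.length ≤ B.length →
    solLoopA A B c = some (altGo A B c) := by
  induction A with
  | nil => intro B c _ _ _; rw [altGo_nil_left]; rfl
  | cons a As ih =>
    intro B c hA hB hlen
    have haAs : ∀ x ∈ As, a ≤ x := (List.pairwise_cons.mp hA).1
    have hAs : As.Pairwise (· ≤ ·) := (List.pairwise_cons.mp hA).2
    rw [solLoopA]
    cases hf : B.findIdx? (fun b => decide (a < b)) with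
    | some i =>
      obtain ⟨hi, hpi, hlt⟩ := List.findIdx?_eq_some_iff_getElem.mp hf
      have hpi' : a < B[i] := by simpa using hpi
      -- the i prefix of B is ≤ a, hence ≤ every element of a :: As
      have hpre : ∀ y ∈ a :: As, ∀ x ∈ B.take i, ¬ y < x := by
        intro y hy x hx
        obtain ⟨j, hj, hxj⟩ := List.getElem_of_mem hx
        have hji : j < i := by rw [List.length_take] at hj; omega
        have hx' : B[j]'(by omega) = x := by simpa [List.getElem_take] using hxj
        have hxa : ¬ a < x := by
          have hBj : ¬ a < B[j]'(by omega) := by simpa using hlt j hji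
          exact hx' ▸ hBj
        have hya : a ≤ y := by
          rcases List.mem_cons.mp hy with rfl | h
          · exact le_refl _
          · exact haAs y h
        omega
      have hsplit : B = B.take i ++ B[i] :: B.drop (i + 1) := by
        conv_lhs => rw [← List.take_append_drop i B]
        rw [List.drop_eq_getElem_cons hi]
      have herase : B.eraseIdx i = B.take i ++ B.drop (i + 1) :=
        List.eraseIdx_eq_take_drop_succ B i
      have hBe : (B.eraseIdx i).Pairwise (· ≤ ·) :=
        hB.sublist (List.eraseIdx_sublist B i)
      have hlen' : As.length ≤ (B.eraseIdx i).length := by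
        rw [List.length_eraseIdx_of_lt hi]; simp at hlen; omega
      show solLoopA As (B.eraseIdx i) (c + 1) = some (altGo (a :: As) B c)
      rw [ih (B.eraseIdx i) (c + 1) hAs hBe hlen']
      congr 1
      -- RHS: altGo (a :: As) B c = 1 step match after skipping the prefix
      conv_rhs => rw [hsplit]
      rw [altGo_skip (a :: As) (B.take i) _ c hpre, altGo_cons, if_pos hpi', herase,
        altGo_skip As (B.take i) _ (c + 1)
          (fun y hy x hx => hpre y (List.mem_cons_of_mem a hy) x hx)]
    | none =>
      have hnone : ∀ b ∈ B, ¬ a < b := by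
        intro b hb
        have := List.findIdx?_eq_none_iff.mp hf b hb
        simpa using this
      cases B with
      | nil => simp at hlen
      | cons b Bs =>
        show (match PySem.List.pop? (b :: Bs) 0 with
              | none => (none : Option Int)
              | some (_, B') => solLoopA As B' c) = some (altGo (a :: As) (b :: Bs) c)
        have hpop : PySem.List.pop? (b :: Bs) 0 = some (b, Bs) :=
          PySem.List.pop?_zero_cons ..
        rw [hpop]
        show solLoopA As Bs c = some (altGo (a :: As) (b :: Bs) c)
        have hBs : Bs.Pairwise (· ≤ ·) := (List.pairwise_cons.mp hB).2
        have hlen' : As.length ≤ Bs.length := by simp at hlen; omega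
        rw [ih Bs c hAs hBs hlen']
        congr 1
        have hz1 : altGo As Bs c = c := by
          refine altGo_eq_acc As Bs c ?_
          intro y hy x hx
          have hxa : ¬ a < x := hnone x (List.mem_cons_of_mem b hx)
          have : a ≤ y := haAs y hy
          omega
        have hz2 : altGo (a :: As) (b :: Bs) c = c := by
          refine altGo_eq_acc _ _ c ?_
          intro y hy x hx
          have hxa : ¬ a < x := hnone x hx
          have hay : a ≤ y := by
            rcases List.mem_cons.mp hy with rfl | h
            · exact le_refl _
            · exact haAs y h
          omega
        rw [hz1, hz2]

-- when A's early 'all' test passes and len A ≤ len B, the two-pointer count is len A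
lemma altGo_all_lt (A : List Int) : ∀ (B : List Int) (c : Int),
    A.length ≤ B.length →
    (A.zip B).all (fun p => decide (p.1 < p.2)) = true →
    altGo A B c = c + A.length := by
  induction A with
  | nil => intro B c _ _; rw [altGo_nil_left]; simp
  | cons a As ih =>
    intro B c hlen hall
    cases B with
    | nil => simp at hlen
    | cons b Bs =>
      simp only [List.zip_cons_cons, List.all_cons, Bool.and_eq_true, decide_eq_true_eq] at hall
      rw [altGo_cons, if_pos hall.1, ih Bs (c + 1) (by simp at hlen; omega) hall.2]
      simp; omega

-- the generic bridge between the Bool test the port runs and the Prop condition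
lemma zip_all_lt_iff (xs ys : List Int) :
    ((xs.zip ys).all (fun p => decide (p.1 < p.2)) = true) ↔
      ∀ i < min xs.length ys.length, xs.getD i 0 < ys.getD i 0 := by
  rw [List.all_eq_true]
  constructor
  · intro h i hi
    have hx : i < xs.length := by omega
    have hy : i < ys.length := by omega
    have hm : (xs[i], ys[i]) ∈ xs.zip ys := by
      have hz : (xs.zip ys)[i]'(by rw [List.length_zip]; omega) = (xs[i], ys[i]) :=
        List.getElem_zip ..
      rw [← hz]; exact List.getElem_mem _
    have := h _ hm
    rw [List.getD_eq_getElem xs 0 hx, List.getD_eq_getElem ys 0 hy]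
    simpa using this
  · intro h p hp
    obtain ⟨i, hi, hpe⟩ := List.getElem_of_mem hp
    have hlen : i < min xs.length ys.length := by rw [List.length_zip] at hi; omega
    have hx : i < xs.length := by omega
    have hy : i < ys.length := by omega
    have hz : (xs.zip ys)[i]'hi = (xs[i], ys[i]) := List.getElem_zip ..
    have hlt := h i hlen
    rw [List.getD_eq_getElem xs 0 hx, List.getD_eq_getElem ys 0 hy] at hlt
    rw [← hpe, hz]
    simpa using hlt

-- Python's sorted(xs) is the (stable, ≤-)sorted rearrangement; so is insertionSort
lemma sorted_eq_insertionSort (A : List Int) :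
    PySem.List.sorted A (fun x => x) = A.insertionSort (· ≤ ·) := by
  refine PySem.List.sorted_id_eq_of_perm_of_pairwise A _ (List.perm_insertionSort _ A) ?_
  exact List.pairwise_insertionSort _ A

-- pvAllLtP is exactly the Bool test of port A (sorting preserves length)
lemma allLtP_iff_bool (A B : List Int) :
    pvAllLtP A B ↔
      (((PySem.List.sorted A (fun x => x)).zip (PySem.List.sorted B (fun x => x))).all
        (fun p => decide (p.1 < p.2)) = true) := by
  rw [zip_all_lt_iff, pvAllLtP, PySem.List.length_sorted, PySem.List.length_sorted,
    sorted_eq_insertionSort, sorted_eq_insertionSort]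

lemma sorted_pairwise_le (L : List Int) :
    (PySem.List.sorted L (fun x => x)).Pairwise (· ≤ ·) :=
  PySem.List.sorted_pairwise L (fun x => x)

-- the central equality, for len A ≤ len B
lemma solution_eq_alt_of_le (A B : List Int) (hlen : A.length ≤ B.length) :
    solution A B = solution_alt A B := by
  unfold solution solution_alt
  have hlA : (PySem.List.sorted A (fun x => x)).length = A.length := PySem.List.length_sorted ..
  have hlB : (PySem.List.sorted B (fun x => x)).length = B.length := PySem.List.length_sorted ..
  have hlen' : (PySem.List.sorted A (fun x => x)).length ≤ (PySem.List.sorted B (fun x => x)).length := by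
    omega
  split
  · next hall =>
    rw [altGo_all_lt _ _ 0 hlen' hall, hlA]
    omega
  · rw [loopA_eq _ _ 0 (sorted_pairwise_le A) (sorted_pairwise_le B) hlen']
    rfl

-- ===== VERDICT (by name: the statement is the Claim_ definition above) =====
theorem solution_spec : Claim_unchanged_solution := by
  intro A B _ hpre hnd
  have hlen : A.length ≤ B.length := by
    rcases hpre with h | h
    · exact h
    · by_contra hgt
      exact hnd ⟨by omega, h⟩
  exact solution_eq_alt_of_le A B hlen

theorem solution_changed : Claim_changed_solution := by
  unfold Claim_changed_solution; decide

theorem solution_tight : Claim_exact_solution := by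
  intro A B _ _ hD
  obtain ⟨hlen, hall⟩ := hD
  have hallS : ((PySem.List.sorted A (fun x => x)).zip (PySem.List.sorted B (fun x => x))).all
      (fun p => decide (p.1 < p.2)) = true := (allLtP_iff_bool A B).mp hall
  have hA : solution A B = (A.length : Int) := by
    unfold solution
    rw [if_pos hallS, PySem.List.length_sorted]
  have hB : solution_alt A B ≤ (B.length : Int) := by
    unfold solution_alt
    have := altGo_le (PySem.List.sorted A (fun x => x)) (PySem.List.sorted B (fun x => x)) 0
    rw [PySem.List.length_sorted] at this
    omega
  intro heq
  rw [hA] at heq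
  omega
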